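-- pv_equiv track=rewrite | github.com/flengyel/Operations-Tensorielles-Simpliciales | src/notebooks/finite_difference_analysis.py | calculate_missing_indices
-- ===== SOURCE A (Python) =====
-- import itertools
-- from typing import List, Tuple, Set
--
-- _cache = {}
--
-- def calculate_missing_indices(shape: Tuple[int, ...], horn_j: int = 0) -> int:
--     """
--     Calculates the number of missing indices for a given tensor shape and horn.
--     This version includes memoization to speed up repeated calculations for the same shape.
--     """
--     # Use a canonical representation for caching (sorted tuple)
--     cache_key = (tuple(sorted(shape)), horn_j)
--     if cache_key in _cache:
--         return _cache[cache_key]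
--
--     order_k = len(shape)
--     dim_N = min(shape) - 1
--
--     if dim_N < 0:
--         return 0
--
--     if horn_j < 0 or horn_j > dim_N:
--         raise ValueError(f"Horn index {horn_j} is out of bounds for dimension {dim_N}")
--
--     all_indices = itertools.product(*[range(s) for s in shape])
--
--     face_indices_in_horn = [i for i in range(dim_N + 1) if i != horn_j]
--
--     if not face_indices_in_horn:
--         # This case is tricky with a generator. We must consume it to count.
--         # For very large shapes, this could be a memory issue if not handled carefully.
--         # However, for N=0, this is unlikely to be a problem.
--         count = sum(1 for _ in all_indices)
--         _cache[cache_key] = count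
--         return count
--
--     # The first set E_k is computed from the full generator
--     first_k = face_indices_in_horn[0]
--     missing_indices = {idx for idx in all_indices if first_k in idx}
--
--     # Intersect with the remaining sets E_k
--     for k in face_indices_in_horn[1:]:
--         # Filter the already reduced set, which is much more efficient
--         missing_indices = {idx for idx in missing_indices if k in idx}
--
--     result = len(missing_indices)
--     _cache[cache_key] = result
--     return result
-- ===== SOURCE B (Python) =====
-- def calculate_missing_indices(shape, horn_j=0):
--     """Inclusion-exclusion closed form: count tuples in prod(range(s)) containing
--     every required face value, via per-coordinate avoidance counts."""
--     dim_N = min(shape) - 1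
--     if dim_N < 0:
--         return 0
--     if horn_j < 0 or horn_j > dim_N:
--         raise ValueError(f"Horn index {horn_j} is out of bounds for dimension {dim_N}")
--     r = dim_N  # |{0,...,dim_N} \ {horn_j}|: number of required values
--     total = 0
--     for m in range(r + 1):
--         prod = 1
--         for s in shape:
--             prod *= (s - m)
--         total += (-1) ** m * _comb(r, m) * prod
--     return total
--
--
-- def _comb(n, k):
--     c = 1
--     for i in range(k):
--         c = c * (n - i) // (i + 1)
--     return c
-- ===== Notes on version B (the rewrite author's own statement) =====
-- stated objective: alternative
-- what changed: Replaces A's exhaustive enumeration of the whole index space (itertools.product plus repeated set filtering per required face value) by an inclusion-exclusion closed form: sum over m of (-1)^m * C(r, m) * prod_i (s_i - m), where r = min(shape) - 1 is the number of required face values.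
import Mathlib
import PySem

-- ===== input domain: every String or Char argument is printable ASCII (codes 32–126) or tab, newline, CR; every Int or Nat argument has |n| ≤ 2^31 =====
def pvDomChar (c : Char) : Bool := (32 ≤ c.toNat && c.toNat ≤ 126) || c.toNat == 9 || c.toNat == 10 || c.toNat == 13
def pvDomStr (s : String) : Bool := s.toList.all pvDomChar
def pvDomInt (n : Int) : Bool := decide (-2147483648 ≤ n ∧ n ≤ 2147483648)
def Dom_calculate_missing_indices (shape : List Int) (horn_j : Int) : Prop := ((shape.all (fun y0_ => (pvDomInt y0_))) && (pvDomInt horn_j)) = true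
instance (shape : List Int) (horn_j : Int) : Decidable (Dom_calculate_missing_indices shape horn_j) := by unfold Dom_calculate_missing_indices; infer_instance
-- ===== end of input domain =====

-- B replaces A's enumeration of the whole index space by an inclusion-exclusion
-- closed form over the required face values (per-coordinate avoidance counts);
-- equivalence is about the return value (A's module-level cache only memoizes the
-- same pure computation and does not change any return value).

-- ===== PORT A =====
-- itertools.product(*[range(s) for s in shape])
def pvProdA (shape : List Int) : List (List Int) :=
  match shape with
  | [] => [[]]
  | s :: rest => (PySem.List.pyRange 0 s 1).flatMap (fun v => (pvProdA rest).map (fun t => v :: t))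

-- A's set comprehensions range over the distinct tuples of pvProdA, so List.filter
-- (which preserves distinctness) is exact for the resulting len().
def calculate_missing_indices (shape : List Int) (horn_j : Int) : Int :=
  match PySem.List.min? shape (fun y => y) with
  | none => 0   -- Python: min of an empty sequence raises ValueError; excluded by Pre_
  | some mn =>
    let dim_N : Int := mn - 1
    if dim_N < 0 then 0
    else if horn_j < 0 ∨ horn_j > dim_N then 0  -- Python: raise ValueError; excluded by Pre_
    else
      let all_indices := pvProdA shape
      let face_indices := (PySem.List.pyRange 0 (dim_N + 1) 1).filter (fun i => decide (i ≠ horn_j))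
      match face_indices with
      | [] => (all_indices.length : Int)
      | k :: ks =>
        let m0 := all_indices.filter (fun idx => decide (k ∈ idx))
        ((ks.foldl (fun acc k' => acc.filter (fun idx => decide (k' ∈ idx))) m0).length : Int)

-- ===== PORT B =====
-- _comb(n, k): multiplicative binomial loop
def pvCombB (n : Int) (k : Int) : Int :=
  (PySem.List.pyRange 0 k 1).foldl (fun c i => PySem.Int.floordiv (c * (n - i)) (i + 1)) 1

def calculate_missing_indices_alt (shape : List Int) (horn_j : Int) : Int :=
  match PySem.List.min? shape (fun y => y) with
  | none => 0   -- Python: min of an empty sequence raises ValueError; excluded by Pre_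
  | some mn =>
    let dim_N : Int := mn - 1
    if dim_N < 0 then 0
    else if horn_j < 0 ∨ horn_j > dim_N then 0  -- Python: raise ValueError; excluded by Pre_
    else
      let r := dim_N
      (PySem.List.pyRange 0 (r + 1) 1).foldl
        (fun total m =>
          total + (-1) ^ m.toNat * pvCombB r m * shape.foldl (fun p s => p * (s - m)) 1) 0

-- ===== PRECONDITION & SPEC =====
-- min(shape) as the Python code computes it on a nonempty shape
def pvMinSh (shape : List Int) : Int :=
  match shape with
  | [] => 0
  | x :: t => t.foldl min x

-- Pre_ excludes exactly the inputs where A raises: an empty shape, where min raises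
-- ValueError, and, when min(shape) ≥ 1, a horn_j outside [0, min(shape)-1], where A
-- raises its explicit ValueError. A returns on every input Pre_ admits (B raises at
-- exactly the same inputs).
def Pre_calculate_missing_indices (shape : List Int) (horn_j : Int) : Prop :=
  shape ≠ [] ∧ (1 ≤ pvMinSh shape → 0 ≤ horn_j ∧ horn_j < pvMinSh shape)
instance (shape : List Int) (horn_j : Int) : Decidable (Pre_calculate_missing_indices shape horn_j) := by
  unfold Pre_calculate_missing_indices; infer_instance

def pvWitness_calculate_missing_indices : List Int × Int := ([2, 3], 1)

def Spec_calculate_missing_indices (shape : List Int) (horn_j : Int) (out : Int) : Prop := out = calculate_missing_indices_alt shape horn_j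
instance (shape : List Int) (horn_j : Int) (out : Int) : Decidable (Spec_calculate_missing_indices shape horn_j out) := by unfold Spec_calculate_missing_indices; infer_instance

-- ===== CLAIM (what is proved, stated in full; the proofs are below) =====
def Claim_equal_calculate_missing_indices : Prop := ∀ (shape : List Int) (horn_j : Int), Dom_calculate_missing_indices shape horn_j → Pre_calculate_missing_indices shape horn_j → Spec_calculate_missing_indices shape horn_j (calculate_missing_indices shape horn_j)

-- ===== LEMMAS AND PROOFS =====

-- number of tuples of the index product containing every value of R
def pvCount (shape : List Int) (R : List Int) : Nat :=
  ((pvProdA shape).filter (fun x => R.all (fun u => decide (u ∈ x)))).length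

-- the inclusion-exclusion sum B computes
def pvG (shape : List Int) (r : Nat) : Int :=
  ∑ m ∈ Finset.range (r + 1), (-1 : Int) ^ m * (r.choose m : Int) * ((shape.map (fun s => s - (m : Int))).prod)

theorem pv_nodup_pyRange (s : Int) : (PySem.List.pyRange 0 s 1).Nodup := by
  rcases le_or_gt 0 s with h | h
  · obtain ⟨n, rfl⟩ := Int.eq_ofNat_of_zero_le h
    rw [PySem.List.pyRange_zero_natCast]
    exact List.Nodup.map (fun a b hab => by exact_mod_cast hab) (List.nodup_range)
  · have he : PySem.List.pyRange 0 s 1 = [] := by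
      apply List.eq_nil_iff_forall_not_mem.mpr
      intro a ha
      rw [PySem.List.mem_pyRange_one] at ha
      omega
    rw [he]; exact List.nodup_nil

theorem pv_all_mem_cons (R t : List Int) (v : Int) :
    (R.all (fun u => decide (u ∈ v :: t))) = ((R.filter (fun u => decide (u ≠ v))).all (fun u => decide (u ∈ t))) := by
  induction R with
  | nil => simp
  | cons a R _ih =>
    by_cases h : a = v
    · subst h; simp [List.mem_cons]
    · simp [List.mem_cons, h]

theorem pv_foldl_filter (ks : List Int) (init : List (List Int)) :
    ks.foldl (fun acc k' => acc.filter (fun idx => decide (k' ∈ idx))) init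
      = init.filter (fun idx => ks.all (fun k' => decide (k' ∈ idx))) := by
  induction ks generalizing init with
  | nil => simp
  | cons k ks ih =>
    simp only [List.foldl_cons]
    rw [ih, List.filter_filter]
    apply List.filter_congr
    intro x _
    simp [Bool.and_comm]

theorem pv_count_cons (s : Int) (rest : List Int) (R : List Int) :
    pvCount (s :: rest) R
      = ((PySem.List.pyRange 0 s 1).map (fun v => pvCount rest (R.filter (fun u => decide (u ≠ v))))).sum := by
  simp only [pvCount, pvProdA]
  rw [List.filter_flatMap, List.length_flatMap]
  apply congrArg List.sum
  apply List.map_congr_left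
  intro v _
  rw [List.filter_map, List.length_map]
  apply congrArg List.length
  apply List.filter_congr
  intro x _
  exact pv_all_mem_cons R x v

theorem pv_sum_map_ite (L : List Int) (p : Int → Bool) (f : Int → Int) (a b : Int)
    (hf : ∀ v ∈ L, p v = true → f v = a) (hg : ∀ v ∈ L, p v = false → f v = b) :
    (L.map f).sum = (L.countP p : Int) * a + (L.countP (fun v => ! p v) : Int) * b := by
  induction L with
  | nil => simp
  | cons x L ih =>
    have ih' := ih (fun v hv => hf v (by simp [hv])) (fun v hv => hg v (by simp [hv]))
    rcases hx : p x with _ | _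
    · have hfx := hg x (by simp) hx
      simp [hx, hfx]
      rw [ih']
      ring
    · have hfx := hf x (by simp) hx
      simp [hx, hfx]
      rw [ih']
      ring

theorem pv_countP_mem (L R : List Int) (hL : L.Nodup) (hR : R.Nodup) (hsub : ∀ u ∈ R, u ∈ L) :
    L.countP (fun v => decide (v ∈ R)) = R.length := by
  rw [List.countP_eq_length_filter]
  have hperm : (L.filter (fun v => decide (v ∈ R))).Perm R := by
    rw [List.perm_ext_iff_of_nodup (hL.filter _) hR]
    intro a
    simp only [List.mem_filter, decide_eq_true_eq]
    exact ⟨fun h => h.2, fun h => ⟨hsub a h, h⟩⟩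
  exact hperm.length_eq

theorem pv_countP_not (L : List Int) (p : Int → Bool) :
    L.countP (fun v => ! p v) = L.length - L.countP p := by
  induction L with
  | nil => simp
  | cons x L ih =>
    have hle := List.countP_le_length (p := p) (l := L)
    rcases hx : p x with _ | _ <;> simp [hx, ih] <;> try omega

theorem pv_filter_ne_of_not_mem (R : List Int) (v : Int) (hv : v ∉ R) :
    R.filter (fun u => decide (u ≠ v)) = R := by
  apply List.filter_eq_self.mpr
  intro u hu
  simp only [decide_eq_true_eq]
  rintro rfl
  exact hv hu

theorem pv_length_filter_ne (L : List Int) (v : Int) (h : L.Nodup) (hv : v ∈ L) :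
    (L.filter (fun u => decide (u ≠ v))).length + 1 = L.length := by
  induction L with
  | nil => cases hv
  | cons a L ih =>
    rw [List.nodup_cons] at h
    by_cases hav : a = v
    · subst hav
      rw [List.filter_cons_of_neg (by simp)]
      rw [pv_filter_ne_of_not_mem L a h.1]
      simp
    · rw [List.filter_cons_of_pos (by simp [hav])]
      have hvL : v ∈ L := by
        rcases List.mem_cons.mp hv with h1 | h1
        · exact absurd h1.symm hav
        · exact h1
      have := ih h.2 hvL
      simp only [List.length_cons]
      omega

theorem pvG_cons_zero (s : Int) (rest : List Int) : pvG (s :: rest) 0 = s * pvG rest 0 := by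
  simp [pvG]

theorem pvG_cons_succ (s : Int) (rest : List Int) (r : Nat) :
    pvG (s :: rest) (r + 1) = (r + 1 : Int) * pvG rest r + (s - (r + 1 : Int)) * pvG rest (r + 1) := by
  unfold pvG
  simp only [List.map_cons, List.prod_cons]
  rw [Finset.mul_sum, Finset.mul_sum]
  have e1 : ∑ m ∈ Finset.range (r + 1), ((r : Int) + 1) * ((-1 : Int) ^ m * (r.choose m : Int) * ((rest.map (fun x => x - (m : Int))).prod))
      = ∑ m ∈ Finset.range (r + 1 + 1), ((r : Int) + 1) * ((-1 : Int) ^ m * (r.choose m : Int) * ((rest.map (fun x => x - (m : Int))).prod)) := by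
    rw [Finset.sum_range_succ (n := r + 1)]
    simp [Nat.choose_succ_self]
  rw [e1, ← Finset.sum_add_distrib]
  apply Finset.sum_congr rfl
  intro m hm
  have hmle : m ≤ r + 1 := by
    have := Finset.mem_range.mp hm
    omega
  have h := congrArg (fun z : Nat => (z : Int)) (Nat.choose_mul_succ_eq r m)
  push_cast [Nat.cast_sub hmle] at h
  linear_combination (-((-1 : Int) ^ m * ((rest.map (fun x => x - (m : Int))).prod))) * h

theorem pv_count_eq_G (shape : List Int) (R : List Int) (hR : R.Nodup)
    (hpos : ∀ s ∈ shape, 0 < s) (hu : ∀ u ∈ R, 0 ≤ u ∧ ∀ s ∈ shape, u < s) :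
    (pvCount shape R : Int) = pvG shape R.length := by
  induction shape generalizing R with
  | nil =>
    cases R with
    | nil => simp [pvCount, pvProdA, pvG]
    | cons u R' =>
      have hcount : pvCount [] (u :: R') = 0 := by simp [pvCount, pvProdA]
      have hG : pvG [] (u :: R').length = 0 := by
        simp only [pvG, List.map_nil, List.prod_nil, mul_one, List.length_cons]
        rw [Int.alternating_sum_range_choose]
        simp
      rw [hcount, hG]
      simp
  | cons s rest ih =>
    have hs : 0 < s := hpos s (by simp)
    set L := PySem.List.pyRange 0 s 1 with hL
    have hLeq : L = (List.range s.toNat).map (fun k : Nat => (k : Int)) := by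
      have h2 := PySem.List.pyRange_zero_natCast s.toNat
      rw [show ((s.toNat : Nat) : Int) = s by omega] at h2
      rw [hL]
      exact h2
    have hLlen : L.length = s.toNat := by rw [hLeq]; simp
    have hLnodup : L.Nodup := pv_nodup_pyRange s
    have hsub : ∀ u ∈ R, u ∈ L := by
      intro u huR
      rw [hL, PySem.List.mem_pyRange_one]
      exact ⟨(hu u huR).1, (hu u huR).2 s (by simp)⟩
    have hcast := pv_count_cons s rest R
    have hcc : (pvCount (s :: rest) R : Int)
        = (L.map (fun v => (pvCount rest (R.filter (fun u => decide (u ≠ v))) : Int))).sum := by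
      rw [hcast]
      rw [Nat.cast_list_sum, List.map_map]
      rfl
    rw [hcc]
    have hrec := pv_sum_map_ite L (fun v => decide (v ∈ R))
      (fun v => (pvCount rest (R.filter (fun u => decide (u ≠ v))) : Int))
      (pvG rest (R.length - 1)) (pvG rest R.length)
      (by
        intro v _ hvp
        beta_reduce
        have hvR : v ∈ R := by simpa using hvp
        have hlen := pv_length_filter_ne R v hR hvR
        have hnd : (R.filter (fun u => decide (u ≠ v))).Nodup := hR.filter _
        have hcond : ∀ u ∈ R.filter (fun u => decide (u ≠ v)), 0 ≤ u ∧ ∀ t ∈ rest, u < t := by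
          intro u huf
          have huR : u ∈ R := (List.mem_filter.mp huf).1
          exact ⟨(hu u huR).1, fun t ht => (hu u huR).2 t (by simp [ht])⟩
        have := ih (R.filter (fun u => decide (u ≠ v))) hnd
          (fun t ht => hpos t (by simp [ht])) hcond
        rw [this, show (R.filter (fun u => decide (u ≠ v))).length = R.length - 1 by omega])
      (by
        intro v _ hvp
        beta_reduce
        have hvR : v ∉ R := by simpa using hvp
        rw [pv_filter_ne_of_not_mem R v hvR]
        exact ih R hR (fun t ht => hpos t (by simp [ht]))
          (fun u huR => ⟨(hu u huR).1, fun t ht => (hu u huR).2 t (by simp [ht])⟩))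
    rw [hrec]
    have hcp : L.countP (fun v => decide (v ∈ R)) = R.length := pv_countP_mem L R hLnodup hR hsub
    have hcpn : L.countP (fun v => ! decide (v ∈ R)) = L.length - L.countP (fun v => decide (v ∈ R)) :=
      pv_countP_not L _
    have hle : R.length ≤ s.toNat := by
      rw [← hcp, ← hLlen]; exact List.countP_le_length
    rw [hcp, hcpn, hcp, hLlen]
    cases hRl : R.length with
    | zero =>
      rw [pvG_cons_zero]
      have : ((s.toNat - 0 : Nat) : Int) = s := by omega
      rw [this]
      simp
    | succ r =>
      rw [pvG_cons_succ]
      have h1 : ((s.toNat - (r + 1) : Nat) : Int) = s - (r + 1 : Int) := by omega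
      rw [h1]
      have h2 : r + 1 - 1 = r := by omega
      rw [h2]
      push_cast
      ring

theorem pvCombB_eq_choose (n k : Nat) : pvCombB (n : Int) (k : Int) = (n.choose k : Int) := by
  induction k with
  | zero =>
    rw [pvCombB, PySem.List.pyRange_zero_natCast]
    simp
  | succ k ih =>
    have hstep : pvCombB (n : Int) ((k + 1 : Nat) : Int)
        = PySem.Int.floordiv (pvCombB (n : Int) (k : Int) * ((n : Int) - (k : Int))) ((k : Int) + 1) := by
      rw [pvCombB, pvCombB, show (((k + 1 : Nat)) : Int) = (k : Int) + 1 by push_cast; ring,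
        PySem.List.pyRange_one_succ_right (Int.natCast_nonneg k), List.foldl_append]
      simp
    rw [hstep, ih]
    by_cases hkn : k < n
    · have h := congrArg (fun z : Nat => (z : Int)) (Nat.choose_succ_right_eq n k)
      push_cast [Nat.cast_sub (le_of_lt hkn)] at h
      rw [show (n.choose k : Int) * ((n : Int) - (k : Int)) = (n.choose (k + 1) : Int) * ((k : Int) + 1) by linarith]
      rw [PySem.Int.floordiv_eq_ediv_of_pos (by positivity)]
      rw [Int.mul_ediv_cancel _ (by positivity)]
    · have hzero : (n.choose k : Int) * ((n : Int) - (k : Int)) = 0 := by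
        rcases eq_or_lt_of_le (Nat.le_of_not_lt hkn) with h1 | h1
        · rw [← h1]; simp
        · rw [Nat.choose_eq_zero_of_lt h1]; simp
      rw [hzero, PySem.Int.floordiv_eq_ediv_of_pos (by positivity), Int.zero_ediv,
        Nat.choose_eq_zero_of_lt (by omega)]
      simp

theorem pv_foldl_pyRange_sum (f : Int → Int) (n : Nat) :
    (PySem.List.pyRange 0 (n : Int) 1).foldl (fun t m => t + f m) 0 = ∑ m ∈ Finset.range n, f (m : Int) := by
  induction n with
  | zero =>
    rw [show ((0 : Nat) : Int) = ((0 : Nat) : Int) from rfl, PySem.List.pyRange_zero_natCast]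
    simp
  | succ n ih =>
    rw [show ((n + 1 : Nat) : Int) = (n : Int) + 1 by push_cast; ring,
      PySem.List.pyRange_one_succ_right (Int.natCast_nonneg n), List.foldl_append, ih,
      Finset.sum_range_succ]
    simp

-- ===== VERDICT (by name: the statement is the Claim_ definition above) =====
theorem calculate_missing_indices_spec : Claim_equal_calculate_missing_indices := by
  unfold Claim_equal_calculate_missing_indices
  intro shape horn_j _ hpre
  unfold Spec_calculate_missing_indices
  obtain ⟨hne, hb⟩ := hpre
  cases shape with
  | nil => exact absurd rfl hne
  | cons x t =>
    unfold calculate_missing_indices calculate_missing_indices_alt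
    rw [PySem.List.min?_id_cons]
    dsimp only
    set mn := t.foldl min x with hmn
    by_cases hdim : mn - 1 < 0
    · rw [if_pos hdim, if_pos hdim]
    · have hmn1 : (1 : Int) ≤ mn := by omega
      have hb' := hb (by simpa [pvMinSh] using hmn1)
      have hj0 : 0 ≤ horn_j := hb'.1
      have hjlt : horn_j < mn := by simpa [pvMinSh] using hb'.2
      rw [if_neg hdim, if_neg hdim,
        if_neg (show ¬(horn_j < 0 ∨ horn_j > mn - 1) by omega),
        if_neg (show ¬(horn_j < 0 ∨ horn_j > mn - 1) by omega)]
      set N := (mn - 1).toNat with hN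
      have hNcast : ((N : Nat) : Int) = mn - 1 := Int.toNat_of_nonneg (by omega)
      have hmins : ∀ s ∈ x :: t, mn ≤ s := fun s hs =>
        PySem.List.min?_isMin (PySem.List.min?_id_cons x t) s hs
      have hpos : ∀ s ∈ x :: t, 0 < s := by
        intro s hs
        have := hmins s hs
        omega
      have hrangeB : mn - 1 + 1 = ((N + 1 : Nat) : Int) := by push_cast [hNcast]; ring
      have hB : (PySem.List.pyRange 0 (mn - 1 + 1) 1).foldl
          (fun total m => total + (-1) ^ m.toNat * pvCombB (mn - 1) m
            * (x :: t).foldl (fun p s => p * (s - m)) 1) 0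
          = pvG (x :: t) N := by
        rw [hrangeB, pv_foldl_pyRange_sum]
        unfold pvG
        apply Finset.sum_congr rfl
        intro m _
        rw [Int.toNat_natCast, ← hNcast, pvCombB_eq_choose]
        have hprod : (x :: t).foldl (fun p s => p * (s - (m : Int))) 1
            = ((x :: t).map (fun s => s - (m : Int))).prod := by
          rw [List.prod_eq_foldl, List.foldl_map]
        rw [hprod]
      have hFnodup : ((PySem.List.pyRange 0 (mn - 1 + 1) 1).filter
          (fun i => decide (i ≠ horn_j))).Nodup := (pv_nodup_pyRange _).filter _
      have hFlen : ((PySem.List.pyRange 0 (mn - 1 + 1) 1).filter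
          (fun i => decide (i ≠ horn_j))).length = N := by
        have h1 := pv_length_filter_ne (PySem.List.pyRange 0 (mn - 1 + 1) 1) horn_j
          (pv_nodup_pyRange _) (by rw [PySem.List.mem_pyRange_one]; omega)
        have h2 : (PySem.List.pyRange 0 (mn - 1 + 1) 1).length = N + 1 := by
          rw [hrangeB, PySem.List.pyRange_zero_natCast]
          simp
        omega
      have hFmem : ∀ u ∈ (PySem.List.pyRange 0 (mn - 1 + 1) 1).filter
          (fun i => decide (i ≠ horn_j)), 0 ≤ u ∧ ∀ s ∈ x :: t, u < s := by
        intro u huF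
        rw [List.mem_filter, PySem.List.mem_pyRange_one] at huF
        refine ⟨huF.1.1, fun s hs => ?_⟩
        have := hmins s hs
        omega
      have hcnt := pv_count_eq_G (x :: t) _ hFnodup hpos hFmem
      rw [hFlen] at hcnt
      cases hFc : (PySem.List.pyRange 0 (mn - 1 + 1) 1).filter (fun i => decide (i ≠ horn_j)) with
      | nil =>
        rw [hFc] at hcnt
        simp only [pvCount, List.all_nil, List.filter_true] at hcnt
        rw [hB]
        exact hcnt
      | cons k ks =>
        rw [hFc] at hcnt
        simp only [pvCount, List.all_cons] at hcnt
        dsimp only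
        rw [pv_foldl_filter, List.filter_filter, hB]
        rw [show (fun idx => (ks.all fun k' => decide (k' ∈ idx)) && decide (k ∈ idx))
            = (fun idx => decide (k ∈ idx) && ks.all fun k' => decide (k' ∈ idx)) by
          funext a; exact Bool.and_comm _ _]
        exact hcnt
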